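-- pv_equiv track=rewrite | github.com/khm1102/BOJ | 백준/Silver/14929. 귀찮아 （SIB）/귀찮아 （SIB）.py | f
-- ===== SOURCE A (Python) =====
-- def f(n, xi):
--     total_sum = 0
--
--
--     prefix_sum = [0] * (n + 1)
--     for i in range(1, n + 1):
--         prefix_sum[i] = prefix_sum[i - 1] + xi[i - 1]
--
--     for a in range(1, n):
--         total_sum += (prefix_sum[n] - prefix_sum[a]) * xi[a - 1]
--
--     return total_sum
-- ===== SOURCE B (Python) =====
-- def f(n, xi):
--     s = 0
--     sq = 0
--     for i in range(n):
--         x = xi[i]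
--         s += x
--         sq += x * x
--     return (s * s - sq) // 2
-- ===== Notes on version B (the rewrite author's own statement) =====
-- stated objective: simpler
-- what changed: Replaced A's prefix-sum array plus second index loop over pairs by a single pass accumulating the sum S and sum of squares sq, returning the closed form (S*S - sq) // 2.
import Mathlib
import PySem

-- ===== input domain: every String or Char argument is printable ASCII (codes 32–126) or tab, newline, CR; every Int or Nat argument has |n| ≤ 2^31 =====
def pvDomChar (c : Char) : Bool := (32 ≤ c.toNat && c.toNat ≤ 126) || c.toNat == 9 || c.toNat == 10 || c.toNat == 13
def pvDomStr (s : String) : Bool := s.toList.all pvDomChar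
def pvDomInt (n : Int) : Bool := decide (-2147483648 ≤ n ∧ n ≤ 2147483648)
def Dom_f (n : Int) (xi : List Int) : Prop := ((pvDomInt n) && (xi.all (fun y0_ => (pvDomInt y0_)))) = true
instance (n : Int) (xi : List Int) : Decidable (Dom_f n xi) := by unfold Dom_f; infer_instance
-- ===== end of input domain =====

-- B replaces A's prefix-sum array and pairwise second loop by a single pass
-- accumulating sum and sum of squares, returning the closed form (S*S - sq) // 2 (objective: simpler).

-- ===== PORT A =====
-- literal transliteration of A: build prefix_sum as a list by index assignment,
-- then accumulate (prefix_sum[n] - prefix_sum[a]) * xi[a-1] over a in range(1, n).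
def f (n : Int) (xi : List Int) : Int :=
  let prefix0 : List Int := List.replicate (n + 1).toNat 0
  let pref : List Int :=
    (PySem.List.pyRange 1 (n + 1) 1).foldl
      (fun p i =>
        PySem.List.pySetD p i (PySem.List.pyGetD p (i - 1) 0 + PySem.List.pyGetD xi (i - 1) 0))
      prefix0
  (PySem.List.pyRange 1 n 1).foldl
    (fun t a =>
      t + (PySem.List.pyGetD pref n 0 - PySem.List.pyGetD pref a 0) * PySem.List.pyGetD xi (a - 1) 0)
    0

-- ===== PORT B =====
-- literal transliteration of B: one pass accumulating (s, sq), then (s*s - sq) // 2.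
def f_alt (n : Int) (xi : List Int) : Int :=
  let p : Int × Int :=
    (PySem.List.pyRange 0 n 1).foldl
      (fun (st : Int × Int) i =>
        let x := PySem.List.pyGetD xi i 0
        (st.1 + x, st.2 + x * x))
      (0, 0)
  PySem.Int.floordiv (p.1 * p.1 - p.2) 2

-- ===== PRECONDITION & SPEC =====
-- A raises IndexError (xi[i-1] in the first loop) exactly when n > len(xi); Pre_ excludes that.
def Pre_f (n : Int) (xi : List Int) : Prop := n ≤ (xi.length : Int)
instance (n : Int) (xi : List Int) : Decidable (Pre_f n xi) := by unfold Pre_f; infer_instance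
def pvWitness_f : Int × List Int := (3, [1, 2, 3])

def Spec_f (n : Int) (xi : List Int) (out : Int) : Prop := out = f_alt n xi
instance (n : Int) (xi : List Int) (out : Int) : Decidable (Spec_f n xi out) := by unfold Spec_f; infer_instance

-- ===== CLAIM (what is proved, stated in full; the proofs are below) =====
def Claim_equal_f : Prop := ∀ (n : Int) (xi : List Int), Dom_f n xi → Pre_f n xi → Spec_f n xi (f n xi)

-- ===== LEMMAS AND PROOFS =====

-- sum of products over all index pairs i < j, as structural recursion
def pairSum : List Int → Int
  | [] => 0
  | y :: t => y * t.sum + pairSum t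

def sqSum : List Int → Int
  | [] => 0
  | y :: t => y * y + sqSum t

lemma two_mul_pairSum (ys : List Int) : 2 * pairSum ys = ys.sum * ys.sum - sqSum ys := by
  induction ys with
  | nil => simp [pairSum, sqSum]
  | cons y t ih => simp only [pairSum, sqSum, List.sum_cons]; ring_nf; ring_nf at ih; omega

-- B's fold over a list accumulates sum and square sum
lemma foldl_sum_sq (ys : List Int) (s q : Int) :
    ys.foldl (fun (st : Int × Int) x => (st.1 + x, st.2 + x * x)) (s, q)
      = (s + ys.sum, q + sqSum ys) := by
  induction ys generalizing s q with
  | nil => simp [sqSum]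
  | cons y t ih => simp [List.foldl_cons, ih, sqSum]; constructor <;> ring

-- A's second loop over the true prefix sums computes pairSum
lemma rangeSum_pairSum (ys : List Int) :
    ((List.range (ys.length - 1)).map
      (fun k => (ys.sum - ((ys.take (k + 1)).sum)) * ys.getD k 0)).sum = pairSum ys := by
  induction ys with
  | nil => simp [pairSum]
  | cons y t ih =>
    cases t with
    | nil => simp [pairSum]
    | cons z t' =>
      rw [show (y :: z :: t').length - 1 = (z :: t').length - 1 + 1 by simp]
      rw [List.range_succ_eq_map]
      simp only [List.map_cons, List.map_map, List.sum_cons]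
      rw [show pairSum (y :: z :: t') = y * (z :: t').sum + pairSum (z :: t') from rfl]
      rw [← ih]
      congr 1
      · simp; ring
      · congr 1; apply List.map_congr_left; intro k _; simp [Function.comp]

-- getD of a take, inside the taken range
lemma getD_take_eq (xi : List Int) (m k : Nat) (h : k < m) :
    (xi.take m).getD k 0 = xi.getD k 0 := by
  unfold List.getD; rw [List.getElem?_take]; simp [h]

-- setting the cell just past a prefix of known length
lemma set_at_length {a : Type} (L : List a) (j : Nat) (hL : L.length = j) (x v : a) (rest : List a) :
    (L ++ x :: rest).set j v = L ++ v :: rest := by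
  subst hL; rw [List.set_append, if_neg (lt_irrefl _)]; simp

-- A's first loop: after j iterations the array holds the first j+1 prefix sums, zeros beyond
lemma pref_build (xi : List Int) (m : Nat) (hm : m ≤ xi.length) (j : Nat) (hj : j ≤ m) :
    (PySem.List.pyRange 1 ((j : Int) + 1) 1).foldl
      (fun p i =>
        PySem.List.pySetD p i (PySem.List.pyGetD p (i - 1) 0 + PySem.List.pyGetD xi (i - 1) 0))
      (List.replicate (m + 1) 0)
    = (List.range (j + 1)).map (fun k => (xi.take k).sum) ++ List.replicate (m - j) 0 := by
  induction j with
  | zero =>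
    rw [PySem.List.pyRange_one_eq_nil (by omega)]
    simp [List.replicate_succ]
  | succ j ih =>
    have hj' : j ≤ m := by omega
    rw [show (((j + 1 : Nat) : Int) + 1) = ((j : Int) + 1) + 1 by push_cast; ring,
        PySem.List.pyRange_one_succ_right (by omega), List.foldl_append, ih hj']
    simp only [List.foldl_cons, List.foldl_nil]
    have hlen : ((List.range (j + 1)).map (fun k => (xi.take k).sum)).length = j + 1 := by simp
    have h1 : PySem.List.pyGetD
        ((List.range (j + 1)).map (fun k => (xi.take k).sum) ++ List.replicate (m - j) 0)
        ((j : Int) + 1 - 1) 0 = (xi.take j).sum := by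
      rw [show ((j : Int) + 1 - 1) = ((j : Nat) : Int) by ring, PySem.List.pyGetD_natCast,
          List.getD_append _ _ 0 j (by omega)]
      unfold List.getD; simp
    have h2 : PySem.List.pyGetD xi ((j : Int) + 1 - 1) 0 = xi[j]'(by omega) := by
      rw [show ((j : Int) + 1 - 1) = ((j : Nat) : Int) by ring, PySem.List.pyGetD_natCast]
      unfold List.getD; simp [List.getElem?_eq_getElem (by omega : j < xi.length)]
    rw [h1, h2,
        show ((j : Int) + 1) = (((j + 1 : Nat)) : Int) by push_cast; ring,
        PySem.List.pySetD_natCast,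
        show m - j = (m - (j + 1)) + 1 by omega, List.replicate_succ,
        set_at_length _ (j + 1) hlen 0 _ _]
    have hv : (xi.take j).sum + xi[j]'(by omega) = (xi.take (j + 1)).sum := by
      rw [List.take_add_one, List.getElem?_eq_getElem (by omega : j < xi.length),
          Option.toList_some, List.sum_append, List.sum_cons, List.sum_nil, add_zero]
    rw [hv, List.range_succ, List.map_append, List.range_succ, List.map_append]
    simp [List.range_succ]

-- folding a function of xi[k] over range m is folding over xi.take m
lemma foldl_range_getD {σ : Type} (xi : List Int) (h : σ → Int → σ) (m : Nat)
    (hm : m ≤ xi.length) (init : σ) :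
    (List.range m).foldl (fun st k => h st (xi.getD k 0)) init
      = (xi.take m).foldl h init := by
  induction m generalizing init with
  | zero => simp
  | succ m ih =>
    have hxm : xi.take (m + 1) = xi.take m ++ [xi[m]'(by omega)] := by
      rw [List.take_add_one, List.getElem?_eq_getElem (by omega : m < xi.length)]; rfl
    rw [List.range_succ, List.foldl_append, ih (by omega), hxm, List.foldl_append]
    simp [List.getD, List.getElem?_eq_getElem (show m < xi.length by omega)]

theorem f_spec : Claim_equal_f := by
  intro n xi _ hpre
  unfold Pre_f at hpre
  unfold Spec_f f f_alt
  dsimp only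
  by_cases hn : 0 ≤ n
  · -- main case
    set m : Nat := n.toNat with hm
    have hmlen : m ≤ xi.length := by omega
    set ys : List Int := xi.take m with hys
    have hyslen : ys.length = m := by simp [hys]; omega
    have hB : (PySem.List.pyRange 0 n 1).foldl
        (fun (st : Int × Int) i =>
          (st.1 + PySem.List.pyGetD xi i 0, st.2 + PySem.List.pyGetD xi i 0 * PySem.List.pyGetD xi i 0))
        (0, 0) = (ys.sum, sqSum ys) := by
      have h1 : (List.range m).foldl
          (fun (st : Int × Int) k => (st.1 + xi.getD k 0, st.2 + xi.getD k 0 * xi.getD k 0)) (0, 0)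
          = (xi.take m).foldl (fun (st : Int × Int) x => (st.1 + x, st.2 + x * x)) (0, 0) :=
        foldl_range_getD xi (fun st x => (st.1 + x, st.2 + x * x)) m hmlen ((0, 0) : Int × Int)
      rw [PySem.List.pyRange_zero, ← hm, List.foldl_map]
      simp only [PySem.List.pyGetD_natCast]
      rw [h1, ← hys, foldl_sum_sq]
      simp
    have hpref : (PySem.List.pyRange 1 (n + 1) 1).foldl
        (fun p i =>
          PySem.List.pySetD p i (PySem.List.pyGetD p (i - 1) 0 + PySem.List.pyGetD xi (i - 1) 0))
        (List.replicate (n + 1).toNat 0)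
        = (List.range (m + 1)).map (fun k => (xi.take k).sum) := by
      rw [show (n + 1).toNat = m + 1 by omega, show n + 1 = (m : Int) + 1 by omega,
          pref_build xi m hmlen m le_rfl]
      simp
    rw [hpref, hB]
    dsimp only
    have hdiv : PySem.Int.floordiv (2 * pairSum ys) 2 = pairSum ys := by
      rw [PySem.Int.floordiv_eq_ediv_of_pos (by omega)]
      exact Int.mul_ediv_cancel_left _ (by omega)
    rw [PySem.List.foldl_add, zero_add,
        show ys.sum * ys.sum - sqSum ys = 2 * pairSum ys from (two_mul_pairSum ys).symm,
        hdiv,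
        ← rangeSum_pairSum ys, hyslen, PySem.List.pyRange_one,
        show (n - 1).toNat = m - 1 by omega, List.map_map]
    congr 1
    apply List.map_congr_left
    intro k hk
    have hkm : k < m - 1 := List.mem_range.mp hk
    have hSn : PySem.List.pyGetD ((List.range (m + 1)).map (fun k => (xi.take k).sum)) n 0
        = ys.sum := by
      rw [show n = ((m : Nat) : Int) by omega, PySem.List.pyGetD_natCast]
      unfold List.getD
      simp only [List.getElem?_map, List.getElem?_range (by omega : m < m + 1)]
      simp [hys]
    have hSa : PySem.List.pyGetD ((List.range (m + 1)).map (fun k => (xi.take k).sum))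
        ((1 : Int) + (k : Int)) 0 = (ys.take (k + 1)).sum := by
      rw [show ((1 : Int) + (k : Int)) = (((k + 1 : Nat)) : Int) by push_cast; ring,
          PySem.List.pyGetD_natCast]
      unfold List.getD
      simp only [List.getElem?_map, List.getElem?_range (by omega : k + 1 < m + 1)]
      simp [hys, List.take_take, show min (k + 1) m = k + 1 by omega]
    have hx : PySem.List.pyGetD xi ((1 : Int) + (k : Int) - 1) 0 = ys.getD k 0 := by
      rw [show ((1 : Int) + (k : Int) - 1) = ((k : Nat) : Int) by ring,
          PySem.List.pyGetD_natCast, hys, getD_take_eq xi m k (by omega)]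
    simp only [Function.comp]
    rw [hSn, hSa, hx]
  · -- n < 0: both loops are empty
    rw [show PySem.List.pyRange 1 n 1 = [] from PySem.List.pyRange_one_eq_nil (by omega),
        show PySem.List.pyRange 0 n 1 = [] from PySem.List.pyRange_one_eq_nil (by omega)]
    dsimp only [List.foldl_nil]
    rw [PySem.Int.floordiv_eq_ediv_of_pos (by omega)]
    norm_num
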